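-- pv_equiv track=rewrite | github.com/higorspinto/category_alignment_open_data_portals | code/comprehensive_set.py | fillDictWordFrequentlyCategories
-- ===== SOURCE A (Python) =====
-- def fillDictWordFrequentlyCategories(dictTarget):
--
--     dictWordFrequentlyCategories = {}
--     for target, dictFreq in dictTarget.items():
--
--         maiorFreq = 0
--         for categoria, freqB in dictFreq.items():
--
--             if freqB > maiorFreq:
--                 maiorFreq = freqB
--
--         lstCategorias = []
--         for categoria, freqB in dictFreq.items():
--
--             if(freqB == maiorFreq):
--                 lstCategorias.append(categoria)
--
--         dictWordFrequentlyCategories.update({target : lstCategorias})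
--
--     return dictWordFrequentlyCategories
-- ===== SOURCE B (Python) =====
-- def fillDictWordFrequentlyCategories(dictTarget):
--     dictWordFrequentlyCategories = {}
--     for target, dictFreq in dictTarget.items():
--         curMax = 0
--         lstCategorias = []
--         for categoria, freqB in dictFreq.items():
--             if freqB > curMax:
--                 curMax = freqB
--                 lstCategorias = [categoria]
--             elif freqB == curMax:
--                 lstCategorias.append(categoria)
--         dictWordFrequentlyCategories[target] = lstCategorias
--     return dictWordFrequentlyCategories
-- ===== Notes on version B (the rewrite author's own statement) =====
-- stated objective: alternative
-- what changed: The two inner passes over each frequency dict (one to find the max, one to collect the categories at that max) are fused into a single pass that maintains the running max and resets/extends the category list as it goes.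
import Mathlib
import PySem

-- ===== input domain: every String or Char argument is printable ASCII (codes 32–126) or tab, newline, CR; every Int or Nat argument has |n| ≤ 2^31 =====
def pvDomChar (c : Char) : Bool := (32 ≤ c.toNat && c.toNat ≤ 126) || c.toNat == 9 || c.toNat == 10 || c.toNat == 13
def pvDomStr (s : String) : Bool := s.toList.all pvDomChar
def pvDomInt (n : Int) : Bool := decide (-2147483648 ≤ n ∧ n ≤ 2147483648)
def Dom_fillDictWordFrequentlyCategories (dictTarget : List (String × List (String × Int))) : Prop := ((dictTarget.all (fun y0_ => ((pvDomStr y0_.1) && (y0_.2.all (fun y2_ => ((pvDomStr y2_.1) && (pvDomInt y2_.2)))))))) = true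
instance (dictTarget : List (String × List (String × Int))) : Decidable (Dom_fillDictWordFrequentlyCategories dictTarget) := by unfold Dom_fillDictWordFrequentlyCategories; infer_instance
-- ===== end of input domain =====

-- B fuses A's two inner passes (find max, then collect) into one pass keeping a running max; same results.


-- ===== PORT A =====
-- dict parameters are interpreted through PySem.Dict.ofList (Python dict construction: unique
-- keys, first position, last value); both ports do this identically at entry.
def fillDictWordFrequentlyCategories (dictTarget : List (String × List (String × Int))) : List (String × List String) :=
  ((PySem.Dict.ofList dictTarget).items.foldl
    (fun d p =>
      let dictFreq := (PySem.Dict.ofList p.2).items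
      let maiorFreq := dictFreq.foldl (fun m q => if q.2 > m then q.2 else m) (0 : Int)
      let lstCategorias := dictFreq.foldl (fun acc q => if q.2 == maiorFreq then acc ++ [q.1] else acc) ([] : List String)
      d.insert p.1 lstCategorias)
    (PySem.Dict.empty : PySem.Dict String (List String))).items

-- ===== PORT B =====
def fillDictWordFrequentlyCategories_alt (dictTarget : List (String × List (String × Int))) : List (String × List String) :=
  ((PySem.Dict.ofList dictTarget).items.foldl
    (fun d p =>
      d.insert p.1
        (((PySem.Dict.ofList p.2).items.foldl
            (fun (s : Int × List String) q =>
              if q.2 > s.1 then (q.2, [q.1])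
              else if q.2 == s.1 then (s.1, s.2 ++ [q.1])
              else s)
            ((0 : Int), ([] : List String))).2))
    (PySem.Dict.empty : PySem.Dict String (List String))).items

-- ===== PRECONDITION & SPEC =====
def Spec_fillDictWordFrequentlyCategories (dictTarget : List (String × List (String × Int))) (out : List (String × List String)) : Prop := out = fillDictWordFrequentlyCategories_alt dictTarget
instance (dictTarget : List (String × List (String × Int))) (out : List (String × List String)) : Decidable (Spec_fillDictWordFrequentlyCategories dictTarget out) := by unfold Spec_fillDictWordFrequentlyCategories; infer_instance

-- ===== CLAIM (what is proved, stated in full; the proofs are below) =====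
def Claim_equal_fillDictWordFrequentlyCategories : Prop := ∀ (dictTarget : List (String × List (String × Int))), Dom_fillDictWordFrequentlyCategories dictTarget → Spec_fillDictWordFrequentlyCategories dictTarget (fillDictWordFrequentlyCategories dictTarget)

-- ===== LEMMAS AND PROOFS =====

-- the max step, with a general initial value
def pvMx (a : Int) (l : List (String × Int)) : Int :=
  l.foldl (fun m q => if q.2 > m then q.2 else m) a

theorem pvMx_le_init (a : Int) (l : List (String × Int)) : a ≤ pvMx a l := by
  induction l generalizing a with
  | nil => simp [pvMx]
  | cons q t ih =>
    have hstep : pvMx a (q :: t) = pvMx (if q.2 > a then q.2 else a) t := by simp [pvMx]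
    rw [hstep]
    have h2 := ih (if q.2 > a then q.2 else a)
    by_cases hq : q.2 > a
    · rw [if_pos hq] at h2 ⊢; omega
    · rw [if_neg hq] at h2 ⊢; omega

theorem pvMx_mem_le (a : Int) (l : List (String × Int)) (q : String × Int) (hq : q ∈ l) :
    q.2 ≤ pvMx a l := by
  induction l generalizing a with
  | nil => cases hq
  | cons x t ih =>
    have hstep : pvMx a (x :: t) = pvMx (if x.2 > a then x.2 else a) t := by simp [pvMx]
    rcases List.mem_cons.mp hq with h | h
    · subst h
      rw [hstep]
      have h2 := pvMx_le_init (if q.2 > a then q.2 else a) t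
      by_cases hx : q.2 > a
      · rw [if_pos hx] at h2 ⊢; omega
      · rw [if_neg hx] at h2 ⊢; omega
    · rw [hstep]; exact ih _ h

theorem pvCollect_none (m : Int) (l : List (String × Int)) (acc : List String)
    (h : ∀ q ∈ l, q.2 ≠ m) :
    l.foldl (fun acc q => if q.2 == m then acc ++ [q.1] else acc) acc = acc := by
  induction l generalizing acc with
  | nil => rfl
  | cons x t ih =>
    have hx : ¬ (x.2 == m) = true := by
      simpa using h x (List.mem_cons_self)
    simp only [List.foldl_cons, if_neg hx]
    exact ih acc (fun q hq => h q (List.mem_cons_of_mem _ hq))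

-- the fused pass equals (final max, categories at that max)
theorem pvOnePass_eq (l : List (String × Int)) :
    l.foldl
      (fun (s : Int × List String) q =>
        if q.2 > s.1 then (q.2, [q.1])
        else if q.2 == s.1 then (s.1, s.2 ++ [q.1])
        else s)
      ((0 : Int), ([] : List String))
    = (pvMx 0 l,
       l.foldl (fun acc q => if q.2 == pvMx 0 l then acc ++ [q.1] else acc) ([] : List String)) := by
  induction l using List.reverseRecOn with
  | nil => rfl
  | append_singleton t x ih =>
    have hmx : pvMx 0 (t ++ [x]) = if x.2 > pvMx 0 t then x.2 else pvMx 0 t := by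
      simp [pvMx, List.foldl_append]
    rw [List.foldl_append, List.foldl_append, ih]
    by_cases hgt : x.2 > pvMx 0 t
    · have hmx' : pvMx 0 (t ++ [x]) = x.2 := by rw [hmx, if_pos hgt]
      rw [hmx']
      have hnone : t.foldl (fun acc q => if q.2 == x.2 then acc ++ [q.1] else acc) ([] : List String) = [] := by
        apply pvCollect_none
        intro q hq
        have := pvMx_mem_le 0 t q hq
        omega
      rw [hnone]
      simp [hgt]
    · have hmx' : pvMx 0 (t ++ [x]) = pvMx 0 t := by rw [hmx, if_neg hgt]
      rw [hmx']
      by_cases heq : x.2 = pvMx 0 t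
      · simp [heq]
      · simp [hgt, heq]

theorem pv_outer_eq (l : List (String × List (String × Int))) (d : PySem.Dict String (List String)) :
    l.foldl
      (fun d p =>
        let dictFreq := (PySem.Dict.ofList p.2).items
        let maiorFreq := dictFreq.foldl (fun m q => if q.2 > m then q.2 else m) (0 : Int)
        let lstCategorias := dictFreq.foldl (fun acc q => if q.2 == maiorFreq then acc ++ [q.1] else acc) ([] : List String)
        d.insert p.1 lstCategorias) d
    = l.foldl
      (fun d p =>
        d.insert p.1
          (((PySem.Dict.ofList p.2).items.foldl
              (fun (s : Int × List String) q =>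
                if q.2 > s.1 then (q.2, [q.1])
                else if q.2 == s.1 then (s.1, s.2 ++ [q.1])
                else s)
              ((0 : Int), ([] : List String))).2)) d := by
  induction l generalizing d with
  | nil => rfl
  | cons p t ih =>
    rw [List.foldl_cons, List.foldl_cons]
    have hhead :
        ((PySem.Dict.ofList p.2).items.foldl
            (fun (s : Int × List String) q =>
              if q.2 > s.1 then (q.2, [q.1])
              else if q.2 == s.1 then (s.1, s.2 ++ [q.1])
              else s)
            ((0 : Int), ([] : List String))).2
        = (PySem.Dict.ofList p.2).items.foldl
            (fun acc q =>
              if q.2 == (PySem.Dict.ofList p.2).items.foldl (fun m q => if q.2 > m then q.2 else m) (0 : Int)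
              then acc ++ [q.1] else acc)
            ([] : List String) := by
      rw [pvOnePass_eq]; rfl
    rw [hhead]
    exact ih _

-- ===== VERDICT (by name: the statement is the Claim_ definition above) =====
theorem fillDictWordFrequentlyCategories_spec : Claim_equal_fillDictWordFrequentlyCategories := by
  intro dictTarget _
  show fillDictWordFrequentlyCategories dictTarget = fillDictWordFrequentlyCategories_alt dictTarget
  unfold fillDictWordFrequentlyCategories fillDictWordFrequentlyCategories_alt
  rw [pv_outer_eq]
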